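-- pv_equiv track=rewrite | github.com/michaelmech/Pluribass | data_gen.py | _paired_board_details
-- ===== SOURCE A (Python) =====
-- from typing import List, Tuple, Dict, Any
-- from typing import List, Tuple, Dict, Any
-- from typing import Optional, Tuple, List, Dict
-- from typing import List, Dict
-- from typing import List, Tuple, Dict, Any
-- from collections import Counter
-- from typing import List, Tuple, Dict, Any, Optional
-- from collections import Counter
-- from typing import Optional, Tuple, List
--
-- def _paired_board_details(board_ranks: List[int]) -> Dict[str, int]:
--     """Flags which pair (top/middle/bottom) is paired on the board; 0 if unpaired/trips."""
--     if not board_ranks: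
--         return {"pair_is_top": 0, "pair_is_middle": 0, "pair_is_bottom": 0}
--     rank_counts = Counter(board_ranks)
--     if 2 not in rank_counts.values():
--         return {"pair_is_top": 0, "pair_is_middle": 0, "pair_is_bottom": 0}
--     paired_rank = max([r for r, c in rank_counts.items() if c == 2], default=None)
--     if paired_rank is None:
--         return {"pair_is_top": 0, "pair_is_middle": 0, "pair_is_bottom": 0}
--     uniq_sorted = sorted(set(board_ranks), reverse=True)
--     pos = uniq_sorted.index(paired_rank)
--     return {
--         "pair_is_top": int(pos == 0),
--         "pair_is_middle": int(0 < pos < len(uniq_sorted) - 1),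
--         "pair_is_bottom": int(pos == len(uniq_sorted) - 1),
--     }
-- ===== SOURCE B (Python) =====
-- def _paired_board_details(board_ranks):
--     """Flags which pair (top/middle/bottom) is paired on the board; 0 if unpaired/trips."""
--     counts = {}
--     for r in board_ranks:
--         counts[r] = counts.get(r, 0) + 1
--     pair = lo = hi = None
--     for r, c in counts.items():
--         if lo is None or r < lo:
--             lo = r
--         if hi is None or hi < r:
--             hi = r
--         if c == 2 and (pair is None or pair < r):
--             pair = r
--     if pair is None:
--         return {"pair_is_top": 0, "pair_is_middle": 0, "pair_is_bottom": 0}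
--     return {
--         "pair_is_top": int(pair == hi),
--         "pair_is_middle": int(lo < pair < hi),
--         "pair_is_bottom": int(pair == lo),
--     }
-- ===== Notes on version B (the rewrite author's own statement) =====
-- stated objective: alternative
-- what changed: B drops A's sort-the-distinct-ranks-and-locate-the-pair-by-list.index strategy: a single pass over the count dict tracks the minimum rank, maximum rank and highest paired rank, and the top/middle/bottom flags are derived by comparing the paired rank with the min/max instead of by its position in a sorted list.
import Mathlib
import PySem

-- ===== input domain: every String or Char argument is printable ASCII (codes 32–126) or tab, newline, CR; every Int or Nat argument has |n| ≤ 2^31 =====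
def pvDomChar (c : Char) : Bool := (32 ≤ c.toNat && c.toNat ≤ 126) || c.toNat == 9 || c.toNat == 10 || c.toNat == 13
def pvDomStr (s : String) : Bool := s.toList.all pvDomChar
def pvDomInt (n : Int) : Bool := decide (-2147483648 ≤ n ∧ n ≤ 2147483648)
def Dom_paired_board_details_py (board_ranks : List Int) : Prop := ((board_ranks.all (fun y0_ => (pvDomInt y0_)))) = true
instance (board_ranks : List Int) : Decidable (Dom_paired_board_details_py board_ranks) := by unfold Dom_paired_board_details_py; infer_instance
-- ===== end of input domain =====

-- B replaces A's sort-the-distinct-ranks-and-locate-by-index strategy with a single pass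
-- over the count dict that tracks the min rank, max rank and best paired rank, deriving
-- the flags by comparisons (objective: alternative, no sort).

-- ===== PORT A =====
def pvZeroFlags : List (String × Int) :=
  [("pair_is_top", 0), ("pair_is_middle", 0), ("pair_is_bottom", 0)]

def paired_board_details_py (board_ranks : List Int) : List (String × Int) :=
  if board_ranks = [] then pvZeroFlags
  else
    let rank_counts := PySem.Dict.counter board_ranks
    if rank_counts.values.contains 2 = false then pvZeroFlags
    else
      match PySem.List.max? ((rank_counts.items.filter (fun p => p.2 == 2)).map (fun p => p.1)) id with
      | none => pvZeroFlags
      | some paired_rank =>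
        let uniq_sorted : List Int := PySem.List.sorted (PySem.Set.ofList board_ranks) id true
        -- list.index never raises here: paired_rank is a member of uniq_sorted
        let pos : Int := ((PySem.List.index? uniq_sorted paired_rank).getD 0 : Nat)
        [("pair_is_top", if pos = 0 then 1 else 0),
         ("pair_is_middle", if 0 < pos ∧ pos < (uniq_sorted.length : Int) - 1 then 1 else 0),
         ("pair_is_bottom", if pos = (uniq_sorted.length : Int) - 1 then 1 else 0)]

-- ===== PORT B =====
-- one loop step of B's single pass over the (rank, count) items: state = (pair, lo, hi)
def pvStepB (s : Option Int × Option Int × Option Int) (rc : Int × Int) :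
    Option Int × Option Int × Option Int :=
  let lo := if s.2.1.elim true (fun l => rc.1 < l) then some rc.1 else s.2.1
  let hi := if s.2.2.elim true (fun h => h < rc.1) then some rc.1 else s.2.2
  let pair := if rc.2 = 2 ∧ s.1.elim true (fun p => p < rc.1) then some rc.1 else s.1
  (pair, lo, hi)

def paired_board_details_py_alt (board_ranks : List Int) : List (String × Int) :=
  let counts := board_ranks.foldl (fun d r => d.insert r (d.getD r 0 + 1))
    (PySem.Dict.empty : PySem.Dict Int Int)
  match counts.items.foldl pvStepB (none, none, none) with
  | (none, _, _) => [("pair_is_top", 0), ("pair_is_middle", 0), ("pair_is_bottom", 0)]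
  | (some p, lo, hi) =>
      [("pair_is_top", if some p = hi then 1 else 0),
       ("pair_is_middle", if lo.elim false (fun l => l < p) ∧ hi.elim false (fun h => p < h) then 1 else 0),
       ("pair_is_bottom", if some p = lo then 1 else 0)]

-- ===== PRECONDITION & SPEC =====
def Spec_paired_board_details_py (board_ranks : List Int) (out : List (String × Int)) : Prop := out = paired_board_details_py_alt board_ranks
instance (board_ranks : List Int) (out : List (String × Int)) : Decidable (Spec_paired_board_details_py board_ranks out) := by unfold Spec_paired_board_details_py; infer_instance

-- ===== CLAIM (what is proved, stated in full; the proofs are below) =====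
def Claim_equal_paired_board_details_py : Prop := ∀ (board_ranks : List Int), Dom_paired_board_details_py board_ranks → Spec_paired_board_details_py board_ranks (paired_board_details_py board_ranks)

-- ===== LEMMAS AND PROOFS =====


def pvFoldMax (a : Option Int) (l : List Int) : Option Int :=
  l.foldl (fun a r => if a.elim true (fun h => h < r) then some r else a) a

def pvFoldMin (a : Option Int) (l : List Int) : Option Int :=
  l.foldl (fun a r => if a.elim true (fun h => r < h) then some r else a) a

def pvFoldPair (a : Option Int) (l : List (Int × Int)) : Option Int :=
  l.foldl (fun a rc => if rc.2 = 2 ∧ a.elim true (fun p => p < rc.1) then some rc.1 else a) a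

theorem pv_fold_decomp (l : List (Int × Int)) (s : Option Int × Option Int × Option Int) :
    l.foldl pvStepB s = (pvFoldPair s.1 l, pvFoldMin s.2.1 (l.map (fun p => p.1)),
      pvFoldMax s.2.2 (l.map (fun p => p.1))) := by
  induction l generalizing s with
  | nil => simp [pvFoldPair, pvFoldMin, pvFoldMax]
  | cons rc l ih => simp [pvFoldPair, pvFoldMin, pvFoldMax, pvStepB, ih]

theorem pvFoldMax_cons (a : Option Int) (r : Int) (l : List Int) :
    pvFoldMax a (r :: l) = pvFoldMax (if a.elim true (fun h => h < r) then some r else a) l := rfl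

theorem pvFoldPair_eq (l : List (Int × Int)) (a : Option Int) :
    pvFoldPair a l = pvFoldMax a ((l.filter (fun p => p.2 == 2)).map (fun p => p.1)) := by
  induction l generalizing a with
  | nil => simp [pvFoldPair, pvFoldMax]
  | cons rc l ih =>
    rw [show pvFoldPair a (rc :: l)
        = pvFoldPair (if rc.2 = 2 ∧ a.elim true (fun p => p < rc.1) then some rc.1 else a) l
      from rfl, ih]
    by_cases h : rc.2 = 2
    · rw [List.filter_cons, if_pos (by simp [h] : (rc.2 == 2) = true), List.map_cons,
        pvFoldMax_cons,
        if_congr (show (rc.2 = 2 ∧ a.elim true (fun p => p < rc.1)) ↔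
          (a.elim true (fun p => p < rc.1)) = true by simp [h]) rfl rfl]
    · rw [List.filter_cons, if_neg (by simp [h] : ¬ ((rc.2 == 2) = true)),
        if_neg (by simp [h] : ¬ (rc.2 = 2 ∧ a.elim true (fun p => p < rc.1)))]

theorem pvFoldMax_some (l : List Int) (b : Int) :
    ∃ m, pvFoldMax (some b) l = some m ∧ (m = b ∨ m ∈ l) ∧ b ≤ m ∧ ∀ y ∈ l, y ≤ m := by
  induction l generalizing b with
  | nil => exact ⟨b, rfl, Or.inl rfl, le_refl b, by simp⟩
  | cons r l ih =>
    by_cases h : b < r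
    · obtain ⟨m, hm, hmem, hle, hub⟩ := ih r
      refine ⟨m, ?_, ?_, ?_, ?_⟩
      · simpa [pvFoldMax, h] using hm
      · rcases hmem with h' | h' <;> simp [h']
      · omega
      · intro y hy; rcases List.mem_cons.1 hy with h' | h'
        · omega
        · exact hub y h'
    · obtain ⟨m, hm, hmem, hle, hub⟩ := ih b
      refine ⟨m, ?_, ?_, hle, ?_⟩
      · simpa [pvFoldMax, h] using hm
      · rcases hmem with h' | h' <;> simp [h']
      · intro y hy; rcases List.mem_cons.1 hy with h' | h'
        · omega
        · exact hub y h'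

theorem pvFoldMax_spec (l : List Int) (h : l ≠ []) :
    ∃ m, pvFoldMax none l = some m ∧ m ∈ l ∧ ∀ y ∈ l, y ≤ m := by
  cases l with
  | nil => exact absurd rfl h
  | cons a l =>
    obtain ⟨m, hm, hmem, hle, hub⟩ := pvFoldMax_some l a
    refine ⟨m, by simpa [pvFoldMax] using hm, ?_, ?_⟩
    · rcases hmem with h' | h' <;> simp [h']
    · intro y hy; rcases List.mem_cons.1 hy with h' | h'
      · omega
      · exact hub y h'

theorem pvFoldMin_some (l : List Int) (b : Int) :
    ∃ m, pvFoldMin (some b) l = some m ∧ (m = b ∨ m ∈ l) ∧ m ≤ b ∧ ∀ y ∈ l, m ≤ y := by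
  induction l generalizing b with
  | nil => exact ⟨b, rfl, Or.inl rfl, le_refl b, by simp⟩
  | cons r l ih =>
    by_cases h : r < b
    · obtain ⟨m, hm, hmem, hle, hub⟩ := ih r
      refine ⟨m, ?_, ?_, ?_, ?_⟩
      · simpa [pvFoldMin, h] using hm
      · rcases hmem with h' | h' <;> simp [h']
      · omega
      · intro y hy; rcases List.mem_cons.1 hy with h' | h'
        · omega
        · exact hub y h'
    · obtain ⟨m, hm, hmem, hle, hub⟩ := ih b
      refine ⟨m, ?_, ?_, hle, ?_⟩
      · simpa [pvFoldMin, h] using hm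
      · rcases hmem with h' | h' <;> simp [h']
      · intro y hy; rcases List.mem_cons.1 hy with h' | h'
        · omega
        · exact hub y h'

theorem pvFoldMin_spec (l : List Int) (h : l ≠ []) :
    ∃ m, pvFoldMin none l = some m ∧ m ∈ l ∧ ∀ y ∈ l, m ≤ y := by
  cases l with
  | nil => exact absurd rfl h
  | cons a l =>
    obtain ⟨m, hm, hmem, hle, hub⟩ := pvFoldMin_some l a
    refine ⟨m, by simpa [pvFoldMin] using hm, ?_, ?_⟩
    · rcases hmem with h' | h' <;> simp [h']
    · intro y hy; rcases List.mem_cons.1 hy with h' | h'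
      · omega
      · exact hub y h'

-- the sorted-descending distinct list is strictly descending
theorem pv_sorted_desc (u : List Int) (hnd : u.Nodup) :
    (PySem.List.sorted u id true).Perm u ∧
    List.Pairwise (fun a b => b < a) (PySem.List.sorted u id true) := by
  have hperm : (u.mergeSort (fun a b => decide (b ≤ a))).Perm u := List.mergeSort_perm u _
  have hpw : List.Pairwise (fun a b : Int => b ≤ a) (u.mergeSort (fun a b => decide (b ≤ a))) := by
    have := List.pairwise_mergeSort (le := fun a b : Int => decide (b ≤ a))
      (by intro a b c h1 h2; simp at h1 h2 ⊢; omega)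
      (by intro a b; simp; omega) u
    simpa using this
  have hnd' : (u.mergeSort (fun a b => decide (b ≤ a))).Nodup := hperm.nodup_iff.2 hnd
  have hpw' : List.Pairwise (fun a b : Int => b < a) (u.mergeSort (fun a b => decide (b ≤ a))) := by
    have := hpw.and hnd'
    exact this.imp (fun h => lt_of_le_of_ne h.1 (Ne.symm h.2))
  have heq := PySem.List.sorted_rev_eq_of_perm_of_pairwise_gt u
    (u.mergeSort (fun a b => decide (b ≤ a))) id hperm (by simpa using hpw')
  rw [heq]; exact ⟨hperm, hpw'⟩

theorem pv_desc_facts (pre suf : List Int) (p h l : Int)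
    (hpw : List.Pairwise (fun a b => b < a) (pre ++ p :: suf))
    (hh : h ∈ pre ++ p :: suf) (hub : ∀ y ∈ pre ++ p :: suf, y ≤ h)
    (hl : l ∈ pre ++ p :: suf) (hlb : ∀ y ∈ pre ++ p :: suf, l ≤ y) :
    (pre = [] ↔ p = h) ∧ (suf = [] ↔ p = l) := by
  rw [List.pairwise_append] at hpw
  obtain ⟨hpw1, hpw2, hcross⟩ := hpw
  rw [List.pairwise_cons] at hpw2
  obtain ⟨hps, _⟩ := hpw2
  have hple : p ≤ h := hub p (by simp)
  have hlep : l ≤ p := hlb p (by simp)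
  constructor
  · constructor
    · rintro rfl
      simp at hh
      rcases hh with rfl | hh
      · rfl
      · have := hps h hh; omega
    · intro hpe
      cases pre with
      | nil => rfl
      | cons a pre' =>
        have h1 := hcross a (by simp) p (by simp)
        have h2 := hub a (by simp)
        omega
  · constructor
    · rintro rfl
      simp at hl
      rcases hl with hl | rfl
      · have := hcross l hl p (by simp); omega
      · rfl
    · intro hpe
      cases suf with
      | nil => rfl
      | cons b suf' =>
        have h1 := hps b (by simp)
        have h2 := hlb b (by simp)
        omega

theorem pv_main (xs : List Int) (hxs : xs ≠ []) :
    paired_board_details_py xs = paired_board_details_py_alt xs := by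
  have hund : (PySem.Set.ofList xs : List Int).Nodup := PySem.Set.nodup_ofList xs
  have hune : (PySem.Set.ofList xs : List Int) ≠ [] := by
    cases xs with
    | nil => exact absurd rfl hxs
    | cons a t =>
      intro hemp
      have : a ∈ (PySem.Set.ofList (a :: t) : List Int) := (PySem.Set.mem_ofList _ _).2 (by simp)
      rw [hemp] at this; simp at this
  -- B side reduction
  have hB : paired_board_details_py_alt xs =
      (match (pvFoldPair none ((PySem.Set.ofList xs : List Int).map (fun k => (k, (List.count k xs : Int)))),
              pvFoldMin none (PySem.Set.ofList xs : List Int),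
              pvFoldMax none (PySem.Set.ofList xs : List Int)) with
       | (none, _, _) => [("pair_is_top", 0), ("pair_is_middle", 0), ("pair_is_bottom", 0)]
       | (some p, lo, hi) =>
          [("pair_is_top", if some p = hi then 1 else 0),
           ("pair_is_middle", if lo.elim false (fun l => l < p) ∧ hi.elim false (fun h => p < h) then 1 else 0),
           ("pair_is_bottom", if some p = lo then 1 else 0)] : List (String × Int)) := by
    rw [paired_board_details_py_alt]
    rw [PySem.Dict.foldl_insert_getD_add_one_eq_counter, PySem.Dict.items_counter,
      pv_fold_decomp]
    have hmap : (List.map (fun k => (k, (List.count k xs : Int))) (PySem.Set.ofList xs : List Int)).map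
        (fun p => p.1) = (PySem.Set.ofList xs : List Int) := by
      simp [List.map_map, Function.comp_def]
    rw [hmap]
  rw [hB]
  rw [paired_board_details_py, if_neg hxs]
  simp only [PySem.Dict.values, PySem.Dict.items_counter]
  set u : List Int := (PySem.Set.ofList xs : List Int) with hu
  set L : List (Int × Int) := u.map (fun k => (k, (List.count k xs : Int))) with hL
  set C : List Int := (L.filter (fun p => p.2 == 2)).map (fun p => p.1) with hC
  rw [pvFoldPair_eq, ← hC]
  by_cases hCe : C = []
  · have hfil : ∀ p ∈ L, ¬ ((p.2 == 2) = true) := by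
      rw [hC] at hCe
      simpa [List.filter_eq_nil_iff] using (List.map_eq_nil_iff.1 hCe)
    have hcont : (List.map (fun x => x.2) L).contains 2 = false := by
      rw [List.contains_eq_mem, decide_eq_false_iff_not]
      intro hmem
      obtain ⟨q, hq, hq2⟩ := List.mem_map.1 hmem
      exact hfil q hq (by simp [hq2])
    rw [if_pos hcont, hCe, show pvFoldMax none ([] : List Int) = none from rfl]
    simp [pvZeroFlags]
  · have hcont : ¬ ((List.map (fun x => x.2) L).contains 2 = false) := by
      intro hfalse
      apply hCe
      rw [List.contains_eq_mem, decide_eq_false_iff_not] at hfalse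
      rw [hC, List.map_eq_nil_iff, List.filter_eq_nil_iff]
      intro p hp hbeq
      exact hfalse (List.mem_map.2 ⟨p, hp, by simpa using hbeq⟩)
    rw [if_neg hcont]
    -- A's paired rank
    obtain ⟨p, hp⟩ : ∃ p, PySem.List.max? C id = some p := by
      cases h : PySem.List.max? C id with
      | none => exact absurd ((PySem.List.max?_eq_none_iff C id).1 h) hCe
      | some p => exact ⟨p, rfl⟩
    have hpmem : p ∈ C := PySem.List.max?_mem hp
    have hpub : ∀ y ∈ C, y ≤ p := by
      intro y hy; simpa using PySem.List.max?_isMax hp y hy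
    -- B's pair
    obtain ⟨p', hp', hp'mem, hp'ub⟩ := pvFoldMax_spec C hCe
    have hpp : p' = p := le_antisymm (hpub p' hp'mem) (hp'ub p hpmem)
    subst hpp
    rw [hp, hp']
    -- B's lo / hi
    obtain ⟨hmax, hhi, hhiub⟩ := pvFoldMax_spec u hune
    obtain ⟨hmin, hlo, hloub⟩ := pvFoldMin_spec u hune
    rw [hhi, hlo]
    -- reduce both matches
    show (
      [("pair_is_top", if ((PySem.List.index? (PySem.List.sorted u id true) p').getD 0 : Int) = 0 then 1 else 0),
       ("pair_is_middle", if 0 < ((PySem.List.index? (PySem.List.sorted u id true) p').getD 0 : Int) ∧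
          ((PySem.List.index? (PySem.List.sorted u id true) p').getD 0 : Int) < ((PySem.List.sorted u id true).length : Int) - 1 then 1 else 0),
       ("pair_is_bottom", if ((PySem.List.index? (PySem.List.sorted u id true) p').getD 0 : Int) = ((PySem.List.sorted u id true).length : Int) - 1 then 1 else 0)]
      : List (String × Int)) =
      [("pair_is_top", if some p' = some hmax then 1 else 0),
       ("pair_is_middle", if ((some hmin).elim false fun l => decide (l < p')) = true ∧ ((some hmax).elim false fun h => decide (p' < h)) = true then 1 else 0),
       ("pair_is_bottom", if some p' = some hmin then 1 else 0)]
    -- the sorted distinct list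
    obtain ⟨hperm, hpw⟩ := pv_sorted_desc u hund
    have hpu : p' ∈ u := by
      obtain ⟨q, hqf, hq1⟩ := List.mem_map.1 hpmem
      have hqL : q ∈ L := (List.mem_filter.1 hqf).1
      obtain ⟨k, hk, hkq⟩ := List.mem_map.1 hqL
      rw [← hq1, ← hkq]; exact hk
    have hpv : p' ∈ PySem.List.sorted u id true := hperm.mem_iff.2 hpu
    obtain ⟨i, hidx⟩ : ∃ i, PySem.List.index? (PySem.List.sorted u id true) p' = some i := by
      cases h : PySem.List.index? (PySem.List.sorted u id true) p' with
      | none => exact absurd ((PySem.List.index?_eq_none_iff _ _).1 h) (by simp [hpv])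
      | some i => exact ⟨i, rfl⟩
    obtain ⟨pre, suf, hveq, hlen, hpre⟩ := (PySem.List.index?_eq_some_iff _ _ _).1 hidx
    rw [hidx, hveq]
    -- transport extremal facts to the sorted list
    have hmem_iff : ∀ y, y ∈ pre ++ p' :: suf ↔ y ∈ u := by
      intro y; rw [← hveq]; exact hperm.mem_iff
    have hhmem : hmax ∈ pre ++ p' :: suf := (hmem_iff _).2 hhiub.1
    have hhub : ∀ y ∈ pre ++ p' :: suf, y ≤ hmax := fun y hy => hhiub.2 y ((hmem_iff y).1 hy)
    have hlmem : hmin ∈ pre ++ p' :: suf := (hmem_iff _).2 hloub.1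
    have hlb : ∀ y ∈ pre ++ p' :: suf, hmin ≤ y := fun y hy => hloub.2 y ((hmem_iff y).1 hy)
    rw [hveq] at hpw
    obtain ⟨htop, hbot⟩ := pv_desc_facts pre suf p' hmax hmin hpw hhmem hhub hlmem hlb
    have hple : p' ≤ hmax := hhub p' (by simp)
    have hlep : hmin ≤ p' := hlb p' (by simp)
    -- the three conditions
    have c1 : ((some i).getD 0 : Int) = 0 ↔ some p' = some hmax := by
      simp only [Option.getD_some, Option.some_inj]
      constructor
      · intro h0
        have : pre = [] := List.eq_nil_of_length_eq_zero (by omega)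
        exact htop.1 this
      · intro h0
        have : pre = [] := htop.2 h0
        subst this; simp at hlen; omega
    have hvlen : (pre ++ p' :: suf).length = pre.length + suf.length + 1 := by
      simp [List.length_append]; omega
    have c3 : ((some i).getD 0 : Int) = ((pre ++ p' :: suf).length : Int) - 1 ↔ some p' = some hmin := by
      simp only [Option.getD_some, Option.some_inj, hvlen]
      constructor
      · intro h0
        exact hbot.1 (List.eq_nil_of_length_eq_zero (by omega))
      · intro h0
        have : suf = [] := hbot.2 h0
        subst this; simp only [List.length_nil]; omega
    have c2 : (0 < ((some i).getD 0 : Int) ∧ ((some i).getD 0 : Int) < ((pre ++ p' :: suf).length : Int) - 1) ↔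
        (((some hmin).elim false fun l => decide (l < p')) = true ∧ ((some hmax).elim false fun h => decide (p' < h)) = true) := by
      simp only [Option.getD_some, Option.elim_some, decide_eq_true_eq, hvlen]
      constructor
      · rintro ⟨h1, h2⟩
        constructor
        · rcases lt_or_eq_of_le hlep with h' | h'
          · exact h'
          · exfalso
            have : suf = [] := hbot.2 h'.symm
            subst this; simp only [List.length_nil] at h2; omega
        · rcases lt_or_eq_of_le hple with h' | h'
          · exact h'
          · exfalso
            have : pre = [] := htop.2 h'
            subst this; simp only [List.length_nil] at hlen; omega
      · rintro ⟨h1, h2⟩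
        constructor
        · cases pre with
          | nil => exact absurd (htop.1 rfl) (by omega)
          | cons a t => simp at hlen; omega
        · cases suf with
          | nil => exact absurd (hbot.1 rfl) (by omega)
          | cons a t => simp; omega
    rw [if_congr c1 rfl rfl, if_congr c2 rfl rfl, if_congr c3 rfl rfl]

-- ===== VERDICT (by name: the statement is the Claim_ definition above) =====
theorem paired_board_details_py_spec : Claim_equal_paired_board_details_py := by
  intro board_ranks _
  unfold Spec_paired_board_details_py
  by_cases hxs : board_ranks = []
  · subst hxs; decide
  · exact pv_main board_ranks hxs
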